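-- pv_equiv track=rewrite | github.com/fractalego/bert_ner | bert_ner/aux.py | clean_tuples
-- ===== SOURCE A (Python) =====
-- def erase_non_entities(all_words, all_entities, all_idx):
--     return [(w, e, i) for w, e, i in zip(all_words, all_entities, all_idx) if e and w != ' ']
--
-- def join_consecutive_tuples(tuples):
--     for i in range(len(tuples) - 1):
--         curr_type = tuples[i][1]
--         curr_end_idx = tuples[i][2][1]
--         next_type = tuples[i + 1][1]
--         next_start_idx = tuples[i + 1][2][0]
--         if curr_type == next_type and curr_end_idx == next_start_idx - 1:
--             curr_word = tuples[i][0]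
--             next_word = tuples[i + 1][0]
--             curr_start_idx = tuples[i][2][0]
--             next_end_idx = tuples[i + 1][2][1]
--             tuples[i + 1] = (curr_word + ' ' + next_word,
--                              curr_type,
--                              (curr_start_idx, next_end_idx))
--             tuples[i] = ()
--     tuples = [t for t in tuples if t]
--     return tuples
--
-- def clean_tuples(all_words, all_entities):
--     all_idx = []
--     index = 0
--     for word in all_words:
--         all_idx.append((index, index + len(word)))
--         index += len(word) + 1
--     tuples = erase_non_entities(all_words, all_entities, all_idx)
--     tuples = join_consecutive_tuples(tuples)
--     return tuples
-- ===== SOURCE B (Python) =====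
-- def clean_tuples(all_words, all_entities):
--     result = []
--     index = 0
--     for word, entity in zip(all_words, all_entities):
--         start = index
--         end = index + len(word)
--         index = end + 1
--         if not entity or word == ' ':
--             continue
--         if result:
--             last_word, last_type, (last_start, last_end) = result[-1]
--             if last_type == entity and last_end == start - 1:
--                 result[-1] = (last_word + ' ' + word, last_type, (last_start, end))
--                 continue
--         result.append((word, entity, (start, end)))
--     return result
-- ===== Notes on version B (the rewrite author's own statement) =====
-- stated objective: simpler
-- what changed: Replaced A's three-pass pipeline (build index list, filter, then a mutating merge pass that blanks merged slots with () plus a second filtering pass) by one fused forward pass over zip(words, entities) that computes spans on the fly and merges each kept tuple into the last element of the output when types match and spans are adjacent.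
import Mathlib
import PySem

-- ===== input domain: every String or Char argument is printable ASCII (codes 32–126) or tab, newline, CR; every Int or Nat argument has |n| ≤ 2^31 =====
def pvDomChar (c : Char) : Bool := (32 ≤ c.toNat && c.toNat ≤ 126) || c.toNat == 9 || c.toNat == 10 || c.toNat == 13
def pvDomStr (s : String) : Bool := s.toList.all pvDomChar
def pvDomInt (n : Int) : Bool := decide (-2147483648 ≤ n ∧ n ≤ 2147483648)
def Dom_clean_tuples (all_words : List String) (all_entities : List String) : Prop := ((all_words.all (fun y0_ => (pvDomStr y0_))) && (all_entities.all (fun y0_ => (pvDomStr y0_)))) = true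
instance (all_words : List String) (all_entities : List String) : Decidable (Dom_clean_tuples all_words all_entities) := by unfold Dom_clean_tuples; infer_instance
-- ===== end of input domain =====

-- B replaces A's two-pass merge (mark merged slots with (), then filter) by one forward
-- pass that accumulates into the last element of the output list; objective: simpler.

-- ===== PORT A =====
def erase_non_entities (all_words : List String) (all_entities : List String)
    (all_idx : List (Int × Int)) : List (String × String × (Int × Int)) :=
  (all_words.zip (all_entities.zip all_idx)).filter
    (fun t => decide (t.2.1 ≠ "" ∧ t.1 ≠ " "))

-- one step of the Python loop body of join_consecutive_tuples; () is modelled as `none`.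
-- (The `| _, _ => st` arm only makes the lookup total: in Python tuples[i] and
-- tuples[i+1] are always 3-tuples when read at step i.)
def jctStep (st : List (Option (String × String × (Int × Int)))) (i : Nat) :
    List (Option (String × String × (Int × Int))) :=
  match st[i]?, st[i+1]? with
  | some (some c), some (some n) =>
      if c.2.1 = n.2.1 ∧ c.2.2.2 = n.2.2.1 - 1 then
        (st.set (i+1) (some (c.1 ++ " " ++ n.1, c.2.1, (c.2.2.1, n.2.2.2)))).set i none
      else st
  | _, _ => st

def join_consecutive_tuples (tuples : List (String × String × (Int × Int))) :
    List (String × String × (Int × Int)) :=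
  ((List.range (tuples.length - 1)).foldl jctStep (tuples.map some)).filterMap id

def clean_tuples (all_words : List String) (all_entities : List String) :
    List (String × String × (Int × Int)) :=
  let st := all_words.foldl
    (fun (st : Int × List (Int × Int)) word =>
      (st.1 + PySem.Str.len word + 1, st.2 ++ [(st.1, st.1 + PySem.Str.len word)]))
    (0, [])
  join_consecutive_tuples (erase_non_entities all_words all_entities st.2)

-- ===== PORT B =====
def altStep (st : List (String × String × (Int × Int)) × Int) (we : String × String) :
    List (String × String × (Int × Int)) × Int :=
  let start := st.2
  let stop := st.2 + PySem.Str.len we.1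
  let index' := stop + 1
  if we.2 = "" ∨ we.1 = " " then (st.1, index')
  else
    match st.1.getLast? with
    | some l =>
        if l.2.1 = we.2 ∧ l.2.2.2 = start - 1 then
          (st.1.dropLast ++ [(l.1 ++ " " ++ we.1, l.2.1, (l.2.2.1, stop))], index')
        else (st.1 ++ [(we.1, we.2, (start, stop))], index')
    | none => (st.1 ++ [(we.1, we.2, (start, stop))], index')

def clean_tuples_alt (all_words : List String) (all_entities : List String) :
    List (String × String × (Int × Int)) :=
  ((all_words.zip all_entities).foldl altStep ([], 0)).1

-- ===== PRECONDITION & SPEC =====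
def Spec_clean_tuples (all_words : List String) (all_entities : List String) (out : List (String × String × (Int × Int))) : Prop := out = clean_tuples_alt all_words all_entities
instance (all_words : List String) (all_entities : List String) (out : List (String × String × (Int × Int))) : Decidable (Spec_clean_tuples all_words all_entities out) := by unfold Spec_clean_tuples; infer_instance

-- ===== CLAIM (what is proved, stated in full; the proofs are below) =====
def Claim_equal_clean_tuples : Prop := ∀ (all_words : List String) (all_entities : List String), Dom_clean_tuples all_words all_entities → Spec_clean_tuples all_words all_entities (clean_tuples all_words all_entities)

-- ===== LEMMAS AND PROOFS =====

-- B's merge, on the already-filtered list, as a recursion carrying the current tuple.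
def pvMerge (c : String × String × (Int × Int)) :
    List (String × String × (Int × Int)) → List (String × String × (Int × Int))
  | [] => [c]
  | n :: rest =>
      if c.2.1 = n.2.1 ∧ c.2.2.2 = n.2.2.1 - 1 then
        pvMerge (c.1 ++ " " ++ n.1, c.2.1, (c.2.2.1, n.2.2.2)) rest
      else c :: pvMerge n rest

def pvMergeTop : List (String × String × (Int × Int)) → List (String × String × (Int × Int))
  | [] => []
  | c :: rest => pvMerge c rest

-- the filtered, index-annotated list produced from the remaining (word, entity) pairs
def pvE : List (String × String) → Int → List (String × String × (Int × Int))
  | [], _ => []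
  | (w, e) :: ps, i =>
      if e = "" ∨ w = " " then pvE ps (i + PySem.Str.len w + 1)
      else (w, e, (i, i + PySem.Str.len w)) :: pvE ps (i + PySem.Str.len w + 1)

def pvIdx : List String → Int → List (Int × Int)
  | [], _ => []
  | w :: ws, i => (i, i + PySem.Str.len w) :: pvIdx ws (i + PySem.Str.len w + 1)

theorem idx_foldl (ws : List String) : ∀ (i : Int) (acc : List (Int × Int)),
    (ws.foldl (fun (st : Int × List (Int × Int)) word =>
        (st.1 + PySem.Str.len word + 1, st.2 ++ [(st.1, st.1 + PySem.Str.len word)]))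
      (i, acc)).2 = acc ++ pvIdx ws i := by
  induction ws with
  | nil => intro i acc; simp [pvIdx]
  | cons w ws ih =>
    intro i acc
    simp only [List.foldl_cons, pvIdx]
    rw [ih]
    simp

theorem erase_eq_pvE (ws : List String) : ∀ (es : List String) (i : Int),
    erase_non_entities ws es (pvIdx ws i) = pvE (ws.zip es) i := by
  induction ws with
  | nil => intro es i; simp [erase_non_entities, pvE]
  | cons w ws ih =>
    intro es i
    cases es with
    | nil => simp [erase_non_entities, pvE]
    | cons e es =>
      simp only [erase_non_entities, pvIdx, List.zip_cons_cons, List.filter_cons,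
        decide_eq_true_eq, pvE]
      by_cases h : e = "" ∨ w = " "
      · have hc : ¬ (e ≠ "" ∧ w ≠ " ") := by tauto
        rw [if_neg hc, if_pos h]
        exact ih es _
      · have hc : e ≠ "" ∧ w ≠ " " := by tauto
        rw [if_pos hc, if_neg h]
        simp only [List.cons.injEq, true_and]
        exact ih es _

theorem alt_foldl_concat (ps : List (String × String)) :
    ∀ (acc : List (String × String × (Int × Int))) (c : String × String × (Int × Int)) (i : Int),
    (ps.foldl altStep (acc ++ [c], i)).1 = acc ++ pvMerge c (pvE ps i) := by
  induction ps with
  | nil => intro acc c i; simp [pvE, pvMerge]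
  | cons p ps ih =>
    intro acc c i
    obtain ⟨w, e⟩ := p
    simp only [List.foldl, pvE]
    by_cases h : e = "" ∨ w = " "
    · rw [show altStep (acc ++ [c], i) (w, e) = (acc ++ [c], i + PySem.Str.len w + 1) by
        simp [altStep, h]]
      rw [if_pos h]; exact ih acc c _
    · rw [if_neg h]
      by_cases hm : c.2.1 = e ∧ c.2.2.2 = i - 1
      · rw [show altStep (acc ++ [c], i) (w, e)
            = (acc ++ [(c.1 ++ " " ++ w, c.2.1, (c.2.2.1, i + PySem.Str.len w))],
               i + PySem.Str.len w + 1) by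
          simp [altStep, h, hm]]
        rw [show pvMerge c ((w, e, (i, i + PySem.Str.len w)) :: pvE ps (i + PySem.Str.len w + 1))
            = pvMerge (c.1 ++ " " ++ w, c.2.1, (c.2.2.1, i + PySem.Str.len w))
                (pvE ps (i + PySem.Str.len w + 1)) by
          simp only [pvMerge]; rw [if_pos hm]]
        exact ih acc _ _
      · rw [show altStep (acc ++ [c], i) (w, e)
            = ((acc ++ [c]) ++ [(w, e, (i, i + PySem.Str.len w))], i + PySem.Str.len w + 1) by
          simp [altStep, h, hm]]
        rw [show pvMerge c ((w, e, (i, i + PySem.Str.len w)) :: pvE ps (i + PySem.Str.len w + 1))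
            = c :: pvMerge (w, e, (i, i + PySem.Str.len w)) (pvE ps (i + PySem.Str.len w + 1)) by
          simp only [pvMerge]; rw [if_neg hm]]
        rw [ih (acc ++ [c]) _ _]
        simp
  
theorem alt_foldl_nil (ps : List (String × String)) : ∀ (i : Int),
    (ps.foldl altStep ([], i)).1 = pvMergeTop (pvE ps i) := by
  induction ps with
  | nil => intro i; simp [pvE, pvMergeTop]
  | cons p ps ih =>
    intro i
    obtain ⟨w, e⟩ := p
    simp only [List.foldl, pvE]
    by_cases h : e = "" ∨ w = " "
    · rw [show altStep ([], i) (w, e) = (([] : List (String × String × (Int × Int))), i + PySem.Str.len w + 1) by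
        simp [altStep, h]]
      rw [if_pos h]; exact ih _
    · rw [show altStep ([], i) (w, e)
          = ([] ++ [((w, e, (i, i + PySem.Str.len w)) : String × String × (Int × Int))],
             i + PySem.Str.len w + 1) by
        simp [altStep, h]]
      rw [if_neg h]
      rw [alt_foldl_concat ps [] _ _]
      simp [pvMergeTop]

theorem set_append_len {α : Type} (pre : List α) (x y : α) (tl : List α) :
    (pre ++ y :: tl).set pre.length x = pre ++ x :: tl := by
  induction pre with
  | nil => rfl
  | cons a pre ih => simp [ih]

theorem get_append_len {α : Type} (pre : List α) (y : α) (tl : List α) :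
    (pre ++ y :: tl)[pre.length]? = some y := by
  induction pre with
  | nil => rfl
  | cons a pre ih => simp [ih]

theorem jctStep_eq (st : List (Option (String × String × (Int × Int)))) (i : Nat)
    (c n : String × String × (Int × Int))
    (h1 : st[i]? = some (some c)) (h2 : st[i+1]? = some (some n)) :
    jctStep st i = if c.2.1 = n.2.1 ∧ c.2.2.2 = n.2.2.1 - 1 then
        (st.set (i+1) (some (c.1 ++ " " ++ n.1, c.2.1, (c.2.2.1, n.2.2.2)))).set i none
      else st := by
  unfold jctStep
  rw [h1, h2]

theorem jct_inv (rest : List (String × String × (Int × Int))) :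
    ∀ (c : String × String × (Int × Int)) (pre : List (Option (String × String × (Int × Int)))),
    ((List.range' pre.length rest.length).foldl jctStep (pre ++ some c :: rest.map some)).filterMap id
      = pre.filterMap id ++ pvMerge c rest := by
  induction rest with
  | nil => intro c pre; simp [pvMerge]
  | cons n rest ih =>
    intro c pre
    have hg1 : (pre ++ some c :: some n :: rest.map some)[pre.length]? = some (some c) :=
      get_append_len pre _ _
    have hg2 : (pre ++ some c :: some n :: rest.map some)[pre.length + 1]? = some (some n) := by
      have := get_append_len (pre ++ [some c]) (some n) (rest.map some)
      simpa using this
    simp only [List.map_cons, List.length_cons, List.range'_succ, List.foldl_cons]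
    rw [jctStep_eq _ _ c n hg1 hg2]
    have h1 : (pre ++ some c :: some n :: rest.map some).set (pre.length + 1)
        (some (c.1 ++ " " ++ n.1, c.2.1, (c.2.2.1, n.2.2.2)))
        = pre ++ some c :: some (c.1 ++ " " ++ n.1, c.2.1, (c.2.2.1, n.2.2.2)) :: rest.map some := by
      have := set_append_len (pre ++ [some c])
        (some (c.1 ++ " " ++ n.1, c.2.1, (c.2.2.1, n.2.2.2))) (some n) (rest.map some)
      simpa using this
    split_ifs with hm
    · rw [h1, set_append_len pre none (some c)]
      have h2 := ih (c.1 ++ " " ++ n.1, c.2.1, (c.2.2.1, n.2.2.2)) (pre ++ [none])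
      simp only [List.length_append, List.length_singleton, List.append_assoc,
        List.singleton_append, List.filterMap_append] at h2 ⊢
      rw [h2]
      simp only [pvMerge]
      rw [if_pos hm]
      simp
    · have h2 := ih n (pre ++ [some c])
      simp only [List.length_append, List.length_singleton, List.append_assoc,
        List.singleton_append, List.filterMap_append] at h2 ⊢
      rw [h2]
      simp only [pvMerge]
      rw [if_neg hm]
      simp

theorem jct_eq_mergeTop (ts : List (String × String × (Int × Int))) :
    join_consecutive_tuples ts = pvMergeTop ts := by
  cases ts with
  | nil => rfl
  | cons c rest =>
    unfold join_consecutive_tuples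
    have : List.range ((c :: rest).length - 1) = List.range' 0 rest.length := by
      simp [List.range_eq_range']
    rw [this]
    have := jct_inv rest c []
    simpa [pvMergeTop] using this

-- ===== VERDICT (by name: the statement is the Claim_ definition above) =====
theorem clean_tuples_spec : Claim_equal_clean_tuples := by
  intro ws es _
  unfold Spec_clean_tuples clean_tuples clean_tuples_alt
  show join_consecutive_tuples (erase_non_entities ws es
      (ws.foldl (fun (st : Int × List (Int × Int)) word =>
        (st.1 + PySem.Str.len word + 1, st.2 ++ [(st.1, st.1 + PySem.Str.len word)]))
        (0, [])).2) = _
  rw [idx_foldl ws 0 [], List.nil_append, erase_eq_pvE ws es 0, jct_eq_mergeTop,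
    alt_foldl_nil]
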